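-- pv_equiv track=rewrite | github.com/czffzc/joern-parse-ccpg | joern-export-demo/main.py | analyze_control_flow
-- ===== SOURCE A (Python) =====
-- def analyze_control_flow(parsed_data):
--     """分析控制流
--
--     Args:
--         parsed_data: parse_dot_file的返回结果
--     """
--     # 找出所有控制结构节点
--     control_nodes = {
--         node_id: info
--         for node_id, info in parsed_data['nodes'].items()
--         if info['type'] == 'CONTROL_STRUCTURE'
--     }
--
--     # 找出所有方法节点
--     method_nodes = {
--         node_id: info
--         for node_id, info in parsed_data['nodes'].items()
--         if info['type'] == 'METHOD'
--     }
--
--     # 找出所有块节点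
--     block_nodes = {
--         node_id: info
--         for node_id, info in parsed_data['nodes'].items()
--         if info['type'] == 'BLOCK'
--     }
--
--     return {
--         'control_structures': control_nodes,
--         'methods': method_nodes,
--         'blocks': block_nodes
--     }
-- ===== SOURCE B (Python) =====
-- def analyze_control_flow(parsed_data):
--     """分析控制流 (single dispatch pass instead of three filtering passes)"""
--     control_structures = {}
--     methods = {}
--     blocks = {}
--     for node_id, info in parsed_data['nodes'].items():
--         t = info['type']
--         if t == 'CONTROL_STRUCTURE':
--             control_structures[node_id] = info
--         elif t == 'METHOD':
--             methods[node_id] = info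
--         elif t == 'BLOCK':
--             blocks[node_id] = info
--     return {
--         'control_structures': control_structures,
--         'methods': methods,
--         'blocks': blocks
--     }
-- ===== Notes on version B (the rewrite author's own statement) =====
-- stated objective: alternative
-- what changed: B replaces A's three independent dict-comprehension passes over parsed_data['nodes'] with a single loop that dispatches each node into one of three accumulator dicts via an if/elif chain.
import Mathlib
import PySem

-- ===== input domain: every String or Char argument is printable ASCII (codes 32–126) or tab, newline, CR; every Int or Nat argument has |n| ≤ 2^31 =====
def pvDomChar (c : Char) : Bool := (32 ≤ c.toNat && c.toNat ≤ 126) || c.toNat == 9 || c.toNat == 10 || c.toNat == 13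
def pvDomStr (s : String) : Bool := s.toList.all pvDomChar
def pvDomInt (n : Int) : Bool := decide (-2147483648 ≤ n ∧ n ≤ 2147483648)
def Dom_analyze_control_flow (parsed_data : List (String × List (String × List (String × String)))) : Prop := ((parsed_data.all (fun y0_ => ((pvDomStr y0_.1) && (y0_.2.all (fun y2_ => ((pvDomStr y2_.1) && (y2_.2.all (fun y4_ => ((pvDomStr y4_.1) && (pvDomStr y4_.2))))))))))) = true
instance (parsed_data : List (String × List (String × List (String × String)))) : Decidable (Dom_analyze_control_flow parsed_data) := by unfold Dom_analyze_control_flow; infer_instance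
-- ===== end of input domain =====

-- B groups the nodes in ONE dispatch pass (if/elif into three accumulator dicts) instead of
-- A's three separate filtering passes; same return value, objective: alternative decomposition.

-- ===== PORT A =====
def analyze_control_flow (parsed_data : List (String × List (String × List (String × String)))) : List (String × List (String × List (String × String))) :=
  let nodes := ((PySem.Dict.mk parsed_data).get? "nodes").getD []
  let control_nodes := nodes.foldl
    (fun (d : PySem.Dict String (List (String × String))) p =>
      if ((PySem.Dict.mk p.2).get? "type") == some "CONTROL_STRUCTURE" then d.insert p.1 p.2 else d)
    PySem.Dict.empty
  let method_nodes := nodes.foldl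
    (fun (d : PySem.Dict String (List (String × String))) p =>
      if ((PySem.Dict.mk p.2).get? "type") == some "METHOD" then d.insert p.1 p.2 else d)
    PySem.Dict.empty
  let block_nodes := nodes.foldl
    (fun (d : PySem.Dict String (List (String × String))) p =>
      if ((PySem.Dict.mk p.2).get? "type") == some "BLOCK" then d.insert p.1 p.2 else d)
    PySem.Dict.empty
  [("control_structures", control_nodes.items),
   ("methods", method_nodes.items),
   ("blocks", block_nodes.items)]

-- ===== PORT B =====
def analyze_control_flow_alt (parsed_data : List (String × List (String × List (String × String)))) : List (String × List (String × List (String × String))) :=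
  let nodes := ((PySem.Dict.mk parsed_data).get? "nodes").getD []
  let acc := nodes.foldl
    (fun (acc : PySem.Dict String (List (String × String)) × PySem.Dict String (List (String × String)) × PySem.Dict String (List (String × String))) p =>
      let t := (PySem.Dict.mk p.2).get? "type"
      if t == some "CONTROL_STRUCTURE" then (acc.1.insert p.1 p.2, acc.2.1, acc.2.2)
      else if t == some "METHOD" then (acc.1, acc.2.1.insert p.1 p.2, acc.2.2)
      else if t == some "BLOCK" then (acc.1, acc.2.1, acc.2.2.insert p.1 p.2)
      else acc)
    (PySem.Dict.empty, PySem.Dict.empty, PySem.Dict.empty)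
  [("control_structures", acc.1.items),
   ("methods", acc.2.1.items),
   ("blocks", acc.2.2.items)]

-- ===== PRECONDITION & SPEC =====
-- Pre_ excludes exactly: inputs without a "nodes" key or with a node info lacking the "type" key
-- (there both A and B raise KeyError), and association lists with duplicate keys in the outer dict,
-- in 'nodes' or in an info dict (those do not denote any Python dict, so nothing is claimed there).
def Pre_analyze_control_flow (parsed_data : List (String × List (String × List (String × String)))) : Prop :=
  (parsed_data.map Prod.fst).Nodup ∧
  (PySem.Dict.mk parsed_data).contains "nodes" = true ∧
  (let nodes := ((PySem.Dict.mk parsed_data).get? "nodes").getD [];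
   (nodes.map Prod.fst).Nodup ∧
   ∀ p ∈ nodes, (p.2.map Prod.fst).Nodup ∧ ((PySem.Dict.mk p.2).get? "type").isSome = true)

instance (parsed_data : List (String × List (String × List (String × String)))) : Decidable (Pre_analyze_control_flow parsed_data) := by unfold Pre_analyze_control_flow; infer_instance

def pvWitness_analyze_control_flow : (List (String × List (String × List (String × String)))) :=
  [("nodes", [("1", [("type", "METHOD")]), ("2", [("type", "BLOCK")])])]

def Spec_analyze_control_flow (parsed_data : List (String × List (String × List (String × String)))) (out : List (String × List (String × List (String × String)))) : Prop := out = analyze_control_flow_alt parsed_data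
instance (parsed_data : List (String × List (String × List (String × String)))) (out : List (String × List (String × List (String × String)))) : Decidable (Spec_analyze_control_flow parsed_data out) := by unfold Spec_analyze_control_flow; infer_instance

-- ===== CLAIM (what is proved, stated in full; the proofs are below) =====
def Claim_equal_analyze_control_flow : Prop := ∀ (parsed_data : List (String × List (String × List (String × String)))), Dom_analyze_control_flow parsed_data → Pre_analyze_control_flow parsed_data → Spec_analyze_control_flow parsed_data (analyze_control_flow parsed_data)

-- ===== LEMMAS AND PROOFS =====

-- two distinct type tags cannot both match the same node's type
theorem pvTy_excl {o : Option String} {s s' : String} (h : (o == some s) = true) (hne : s ≠ s') : (o == some s') = false := by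
  simp only [beq_iff_eq] at *
  simp [h, hne]

-- A's conditional-insert fold over fresh distinct keys appends exactly the filtered entries
theorem foldA_items (t : String) (nodes : List (String × List (String × String)))
    (d : PySem.Dict String (List (String × String)))
    (hnd : (nodes.map Prod.fst).Nodup)
    (hf : ∀ p ∈ nodes, d.contains p.1 = false) :
    (nodes.foldl (fun d p => if (PySem.Dict.mk p.2).get? "type" == some t then d.insert p.1 p.2 else d) d).items
      = d.items ++ nodes.filter (fun p => (PySem.Dict.mk p.2).get? "type" == some t) := by
  induction nodes generalizing d with
  | nil => simp
  | cons x rest ih =>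
    simp only [List.map_cons, List.nodup_cons, List.mem_map] at hnd
    have hx : d.contains x.1 = false := hf x (by simp)
    have hne : ∀ p ∈ rest, p.1 ≠ x.1 := fun p hp hc => hnd.1 ⟨p, hp, hc⟩
    have htl : ∀ p ∈ rest, d.contains p.1 = false :=
      fun p hp => hf p (List.mem_cons_of_mem _ hp)
    cases h : ((PySem.Dict.mk x.2).get? "type" == some t) with
    | true =>
      have hfr : ∀ p ∈ rest, (d.insert x.1 x.2).contains p.1 = false := by
        intro p hp
        rw [PySem.Dict.contains_insert]
        simp [hne p hp, htl p hp]
      rw [List.foldl_cons]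
      simp only [h, reduceIte]
      rw [ih (d.insert x.1 x.2) hnd.2 hfr,
          PySem.Dict.items_insert_of_not_contains d x.2 hx]
      simp [h]
    | false =>
      rw [List.foldl_cons]
      simp only [h, Bool.false_eq_true, reduceIte]
      rw [ih d hnd.2 htl]
      simp [h]

-- B's dispatch fold: each component collects exactly its filtered entries
theorem foldB_items (nodes : List (String × List (String × String)))
    (c m b : PySem.Dict String (List (String × String)))
    (hnd : (nodes.map Prod.fst).Nodup)
    (hfc : ∀ p ∈ nodes, c.contains p.1 = false)
    (hfm : ∀ p ∈ nodes, m.contains p.1 = false)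
    (hfb : ∀ p ∈ nodes, b.contains p.1 = false) :
    (nodes.foldl
      (fun (acc : PySem.Dict String (List (String × String)) × PySem.Dict String (List (String × String)) × PySem.Dict String (List (String × String))) p =>
        if (PySem.Dict.mk p.2).get? "type" == some "CONTROL_STRUCTURE" then (acc.1.insert p.1 p.2, acc.2.1, acc.2.2)
        else if (PySem.Dict.mk p.2).get? "type" == some "METHOD" then (acc.1, acc.2.1.insert p.1 p.2, acc.2.2)
        else if (PySem.Dict.mk p.2).get? "type" == some "BLOCK" then (acc.1, acc.2.1, acc.2.2.insert p.1 p.2)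
        else acc)
      (c, m, b))
      = (PySem.Dict.mk (c.items ++ nodes.filter (fun p => (PySem.Dict.mk p.2).get? "type" == some "CONTROL_STRUCTURE")),
         PySem.Dict.mk (m.items ++ nodes.filter (fun p => (PySem.Dict.mk p.2).get? "type" == some "METHOD")),
         PySem.Dict.mk (b.items ++ nodes.filter (fun p => (PySem.Dict.mk p.2).get? "type" == some "BLOCK"))) := by
  induction nodes generalizing c m b with
  | nil => simp
  | cons x rest ih =>
    simp only [List.map_cons, List.nodup_cons, List.mem_map] at hnd
    have hne : ∀ p ∈ rest, p.1 ≠ x.1 := fun p hp hc => hnd.1 ⟨p, hp, hc⟩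
    have hcx : c.contains x.1 = false := hfc x (by simp)
    have hmx : m.contains x.1 = false := hfm x (by simp)
    have hbx : b.contains x.1 = false := hfb x (by simp)
    have tailc : ∀ p ∈ rest, c.contains p.1 = false :=
      fun p hp => hfc p (List.mem_cons_of_mem _ hp)
    have tailm : ∀ p ∈ rest, m.contains p.1 = false :=
      fun p hp => hfm p (List.mem_cons_of_mem _ hp)
    have tailb : ∀ p ∈ rest, b.contains p.1 = false :=
      fun p hp => hfb p (List.mem_cons_of_mem _ hp)
    have hfresh : ∀ (e : PySem.Dict String (List (String × String))),
        (∀ p ∈ rest, e.contains p.1 = false) →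
        ∀ p ∈ rest, (e.insert x.1 x.2).contains p.1 = false := by
      intro e he p hp
      rw [PySem.Dict.contains_insert]
      simp [hne p hp, he p hp]
    cases h1 : ((PySem.Dict.mk x.2).get? "type" == some "CONTROL_STRUCTURE") with
    | true =>
      have h2 := pvTy_excl h1 (show "CONTROL_STRUCTURE" ≠ "METHOD" by decide)
      have h3 := pvTy_excl h1 (show "CONTROL_STRUCTURE" ≠ "BLOCK" by decide)
      rw [List.foldl_cons]
      simp only [h1, reduceIte]
      rw [ih (c.insert x.1 x.2) m b hnd.2 (hfresh c tailc) tailm tailb,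
          PySem.Dict.items_insert_of_not_contains c x.2 hcx]
      simp [h1, h2, h3]
    | false =>
      cases h2 : ((PySem.Dict.mk x.2).get? "type" == some "METHOD") with
      | true =>
        have h3 := pvTy_excl h2 (show "METHOD" ≠ "BLOCK" by decide)
        rw [List.foldl_cons]
        simp only [h1, h2, Bool.false_eq_true, reduceIte]
        rw [ih c (m.insert x.1 x.2) b hnd.2 tailc (hfresh m tailm) tailb,
            PySem.Dict.items_insert_of_not_contains m x.2 hmx]
        simp [h1, h2, h3]
      | false =>
        cases h3 : ((PySem.Dict.mk x.2).get? "type" == some "BLOCK") with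
        | true =>
          rw [List.foldl_cons]
          simp only [h1, h2, h3, Bool.false_eq_true, reduceIte]
          rw [ih c m (b.insert x.1 x.2) hnd.2 tailc tailm (hfresh b tailb),
              PySem.Dict.items_insert_of_not_contains b x.2 hbx]
          simp [h1, h2, h3]
        | false =>
          rw [List.foldl_cons]
          simp only [h1, h2, h3, Bool.false_eq_true, reduceIte]
          rw [ih c m b hnd.2 tailc tailm tailb]
          simp [h1, h2, h3]

-- ===== VERDICT (by name: the statement is the Claim_ definition above) =====
theorem analyze_control_flow_spec : Claim_equal_analyze_control_flow := by
  intro pd _ hpre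
  unfold Pre_analyze_control_flow at hpre
  obtain ⟨-, -, hnd, -⟩ := hpre
  unfold Spec_analyze_control_flow
  have hempty : ∀ p ∈ ((PySem.Dict.mk pd).get? "nodes").getD [],
      (PySem.Dict.empty : PySem.Dict String (List (String × String))).contains p.1 = false :=
    fun p _ => PySem.Dict.contains_empty _
  have hA1 := foldA_items "CONTROL_STRUCTURE" _ _ hnd hempty
  have hA2 := foldA_items "METHOD" _ _ hnd hempty
  have hA3 := foldA_items "BLOCK" _ _ hnd hempty
  have hB := foldB_items _ _ _ _ hnd hempty hempty hempty
  simp only [analyze_control_flow, analyze_control_flow_alt, hB, hA1, hA2, hA3]
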